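-- pv_equiv track=rewrite | github.com/Neural-Symbolic-Image-Labeling/Rapid | FOIL/model_label/bird_foil_for_vscode_old.py | get_possible_clause1
-- ===== SOURCE A (Python) =====
-- import math,re,copy,json,time,random
--
-- def get_new_total_list(result_list,total_list):
--     del_number_hd=[]
--     new_total=copy.deepcopy(total_list)
--     for i in range(len(result_list)):
--         if i!=len(result_list)-1:
--             for image_number,image in enumerate(total_list):
--                 del_result=True
--                 for clause in result_list[i]:
--                     if (clause not in image):        #remember the position of image that does not has special clause
--                         del_result=False
--                         break
--                 if del_result==True:
--                     del_number_hd.append(image_number)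
--         else:
--             for image_number,image in enumerate(total_list):
--                 for clause in result_list[i]:
--                     if (clause not in image):
--                         del_number_hd.append(image_number)
--                         break
--     del_number=list(set(del_number_hd))         #del_number has no duplicate
--     del_number.sort()
--     for i in range(len(del_number)):
--         del new_total[del_number[len(del_number)-1-i]]               #the position is in positive sequence, first delete the back one
--     return new_total   #two dimentional list, get the result which not has the positive that satisfy right side
--
-- def get_new_total_list1(result_list,total_list):        #use for outer loop
--     del_number_hd=[]
--     new_total=copy.deepcopy(total_list)           #use deepcopy for not changing the total_list
--     for clauses_list in result_list:
--         for image_number,image in enumerate(total_list):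
--             del_result=True
--             for clause in clauses_list:
--                 if (clause not in image):        #remember the position of image that does not has special clause
--                     del_result=False
--                     break
--             if del_result==True:
--                 del_number_hd.append(image_number)
--     del_number=list(set(del_number_hd))         #del_number has no duplicate
--     del_number.sort()
--     for i in range(len(del_number)):
--         del new_total[del_number[len(del_number)-1-i]]               #the position is in positive sequence, first delete the back one
--     return new_total   #two dimentional list, get the result which not has the positive that satisfy right side
--
-- def get_possible_clause1(counting,total_list,result_list):
--     if counting==0:
--         new_total=get_new_total_list1(result_list,total_list)
--         clause_total=[]
--         for image in new_total:
--             for i,clause in enumerate(image):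
--                 if i!=0 and (clause not in clause_total):        # The first position of each image is classification, so clauses start from the second position
--                     clause_total.append(clause)
--     else:
--         new_total=get_new_total_list(result_list,total_list)
--         clause_total=[]
--         for image in new_total:
--             for i,clause in enumerate(image):
--                 if i!=0 and (clause not in result_list[len(result_list)-1]) and (clause not in clause_total):        # The first position of each image is classification, so clauses start from the second position
--                     clause_total.append(clause)
--     return clause_total
-- ===== SOURCE B (Python) =====
-- def get_possible_clause1(counting, total_list, result_list):
--     # Single fused pass: keep-predicate per image, collect clauses directly
--     # (no deepcopy, no index bookkeeping, no set/sort/delete).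
--     if counting == 0:
--         banned = []
--         def keep(image):
--             return not any(all(c in image for c in cl) for cl in result_list)
--     else:
--         last = result_list[-1]
--         init = result_list[:-1]
--         banned = last
--         def keep(image):
--             return not (any(all(c in image for c in cl) for cl in init)
--                         or any(c not in image for c in last))
--     out = []
--     for image in total_list:
--         if keep(image):
--             for clause in image[1:]:
--                 if clause not in banned and clause not in out:
--                     out.append(clause)
--     return out
-- ===== Notes on version B (the rewrite author's own statement) =====
-- stated objective: simpler
-- what changed: Replaces A's two-phase pipeline (deepcopy, collect deletion indices per result clause-list, set-dedup, sort, delete back-to-front, then rescan) with one fused forward pass that tests each image against the deletion predicate and collects its clauses directly.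
-- outside the precondition, e.g. on get_possible_clause1(1, [['a']], []): A returns [], B raises IndexError
import Mathlib
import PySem

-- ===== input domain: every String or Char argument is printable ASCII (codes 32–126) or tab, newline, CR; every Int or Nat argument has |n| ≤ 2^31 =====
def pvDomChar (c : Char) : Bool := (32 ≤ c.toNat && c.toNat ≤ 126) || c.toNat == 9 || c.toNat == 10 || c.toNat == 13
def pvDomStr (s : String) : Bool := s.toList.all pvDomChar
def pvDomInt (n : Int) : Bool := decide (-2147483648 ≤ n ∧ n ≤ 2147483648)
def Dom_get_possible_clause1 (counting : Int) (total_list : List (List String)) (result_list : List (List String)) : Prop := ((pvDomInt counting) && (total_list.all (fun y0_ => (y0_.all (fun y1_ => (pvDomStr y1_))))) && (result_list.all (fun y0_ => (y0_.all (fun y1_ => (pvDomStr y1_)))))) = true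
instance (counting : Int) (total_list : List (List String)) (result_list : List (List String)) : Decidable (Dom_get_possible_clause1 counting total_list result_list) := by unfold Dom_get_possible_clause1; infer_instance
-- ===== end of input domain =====

-- B replaces A's deepcopy / deletion-index-set / set-dedup / sort / back-to-front-deletion pipeline with
-- one fused forward pass that tests each image against the deletion predicate and collects clauses directly
-- (objective: simpler; equal return values proved on Pre_).

-- ===== PORT A =====
-- 'del_result=True; for clause in clauses: if clause not in image: del_result=False; break'
def pvAllIn (clauses image : List String) : Bool :=
  match clauses with
  | [] => true
  | c :: rest => if !(image.contains c) then false else pvAllIn rest image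

-- 'for clause in clauses: if clause not in image: append(image_number); break' — appends iff this fires
def pvAnyMissing (clauses image : List String) : Bool :=
  match clauses with
  | [] => false
  | c :: rest => if !(image.contains c) then true else pvAnyMissing rest image

-- del_number_hd of get_new_total_list1 ('for clauses_list in result_list: for image_number,image in enumerate(total_list): …')
def pvHd1 (result_list total_list : List (List String)) : List Nat :=
  result_list.foldl (fun acc clauses_list =>
    (total_list.zipIdx).foldl (fun acc2 p =>
      if pvAllIn clauses_list p.1 then acc2 ++ [p.2] else acc2) acc) []

-- del_number_hd of get_new_total_list ('for i in range(len(result_list)): if i != len(result_list)-1: … else: …')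
def pvHd2 (result_list total_list : List (List String)) : List Nat :=
  (List.range result_list.length).foldl (fun acc i =>
    if i != result_list.length - 1 then
      (total_list.zipIdx).foldl (fun acc2 p =>
        if pvAllIn (result_list.getD i []) p.1 then acc2 ++ [p.2] else acc2) acc
    else
      (total_list.zipIdx).foldl (fun acc2 p =>
        if pvAnyMissing (result_list.getD i []) p.1 then acc2 ++ [p.2] else acc2) acc) []

-- 'del_number=list(set(del_number_hd)); del_number.sort(); for i in range(len(del_number)): del new_total[del_number[len(del_number)-1-i]]'
def pvDelete (total : List (List String)) (hd : List Nat) : List (List String) :=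
  let dn := PySem.List.sorted (PySem.Set.ofList hd) (fun x => x) false
  (List.range dn.length).foldl (fun acc i => acc.eraseIdx (dn.getD (dn.length - 1 - i) 0)) total

def pvGNTL1 (result_list total_list : List (List String)) : List (List String) :=
  pvDelete total_list (pvHd1 result_list total_list)

def pvGNTL (result_list total_list : List (List String)) : List (List String) :=
  pvDelete total_list (pvHd2 result_list total_list)

def get_possible_clause1 (counting : Int) (total_list : List (List String)) (result_list : List (List String)) : List String :=
  if counting = 0 then
    (pvGNTL1 result_list total_list).foldl (fun ct image =>
      (image.zipIdx).foldl (fun ct2 p =>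
        if (p.2 != 0) && !ct2.contains p.1 then ct2 ++ [p.1] else ct2) ct) []
  else
    -- 'result_list[len(result_list)-1]' ported total via a [] default; the raising case is outside Pre_
    (pvGNTL result_list total_list).foldl (fun ct image =>
      (image.zipIdx).foldl (fun ct2 p =>
        if (p.2 != 0) && (!(PySem.List.pyGetD result_list ((result_list.length : Int) - 1) []).contains p.1 && !ct2.contains p.1) then ct2 ++ [p.1] else ct2) ct) []

-- ===== PORT B =====
def pvKeep0 (result_list : List (List String)) (image : List String) : Bool :=
  !(result_list.any (fun cl => cl.all (fun c => image.contains c)))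

def pvKeep1 (init : List (List String)) (last : List String) (image : List String) : Bool :=
  !(init.any (fun cl => cl.all (fun c => image.contains c)) || last.any (fun c => !(image.contains c)))

-- 'for image in total_list: if keep(image): for clause in image[1:]: if clause not in banned and clause not in out: out.append(clause)'
def pvCollect (keep : List String → Bool) (banned : List String) (total_list : List (List String)) : List String :=
  total_list.foldl (fun out image =>
    if keep image then
      (PySem.List.slice image (some 1) none).foldl (fun out2 c =>
        if !banned.contains c && !out2.contains c then out2 ++ [c] else out2) out
    else out) []

def get_possible_clause1_alt (counting : Int) (total_list : List (List String)) (result_list : List (List String)) : List String :=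
  if counting = 0 then
    pvCollect (pvKeep0 result_list) [] total_list
  else
    match PySem.List.pyGet? result_list (-1) with
    | none => []   -- Source B raises IndexError here ('last = result_list[-1]'); outside Pre_
    | some last =>
      pvCollect (pvKeep1 (PySem.List.slice result_list none (some (-1))) last) last total_list

-- ===== PRECONDITION & SPEC =====
-- Pre_ excludes counting ≠ 0 with an empty result_list: there A indexes result_list[-1] and raises
-- IndexError unless every kept image has fewer than two entries (then it returns []), while B's
-- up-front 'last = result_list[-1]' raises IndexError on all of them.
def Pre_get_possible_clause1 (counting : Int) (total_list : List (List String)) (result_list : List (List String)) : Prop :=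
  counting = 0 ∨ result_list ≠ []
instance (counting : Int) (total_list : List (List String)) (result_list : List (List String)) : Decidable (Pre_get_possible_clause1 counting total_list result_list) := by unfold Pre_get_possible_clause1; infer_instance

def pvWitness_get_possible_clause1 : Int × List (List String) × List (List String) :=
  (1, [["bird", "red"], ["bird", "small"]], [["small"]])

def Spec_get_possible_clause1 (counting : Int) (total_list : List (List String)) (result_list : List (List String)) (out : List String) : Prop := out = get_possible_clause1_alt counting total_list result_list
instance (counting : Int) (total_list : List (List String)) (result_list : List (List String)) (out : List String) : Decidable (Spec_get_possible_clause1 counting total_list result_list out) := by unfold Spec_get_possible_clause1; infer_instance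

-- ===== CLAIM (what is proved, stated in full; the proofs are below) =====
def Claim_equal_get_possible_clause1 : Prop := ∀ (counting : Int) (total_list : List (List String)) (result_list : List (List String)), Dom_get_possible_clause1 counting total_list result_list → Pre_get_possible_clause1 counting total_list result_list → Spec_get_possible_clause1 counting total_list result_list (get_possible_clause1 counting total_list result_list)

-- ===== LEMMAS AND PROOFS =====

-- elements of l whose index (counting from s) satisfies p — what A's back-to-front deletions leave
def pvKeepIdx {α : Type} (p : Nat → Bool) : List α → Nat → List α
  | [], _ => []
  | x :: xs, i => if p i then x :: pvKeepIdx p xs (i+1) else pvKeepIdx p xs (i+1)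

theorem pvKeepIdx_congr {α : Type} (p q : Nat → Bool) (l : List α) (s : Nat)
    (h : ∀ i, s ≤ i → p i = q i) : pvKeepIdx p l s = pvKeepIdx q l s := by
  induction l generalizing s with
  | nil => rfl
  | cons x xs ih =>
    simp only [pvKeepIdx, h s le_rfl, ih (s+1) (fun i hi => h i (by omega))]

theorem pvKeepIdx_shift {α : Type} (p : Nat → Bool) (l : List α) (s : Nat) :
    pvKeepIdx p l (s+1) = pvKeepIdx (fun i => p (i+1)) l s := by
  induction l generalizing s with
  | nil => rfl
  | cons x xs ih => simp only [pvKeepIdx, ih (s+1)]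

theorem pvKeepIdx_eq_filter {α : Type} (p : Nat → Bool) (q : α → Bool) (l : List α) (s : Nat)
    (h : ∀ k (hk : k < l.length), p (s + k) = q l[k]) : pvKeepIdx p l s = l.filter q := by
  induction l generalizing s with
  | nil => rfl
  | cons x xs ih =>
    have h0 : p s = q x := by simpa using h 0 (by simp)
    have ih' := ih (s+1) (fun k hk => by
      have := h (k+1) (by simpa using Nat.succ_lt_succ hk)
      simpa [Nat.add_assoc, Nat.add_comm 1 k] using this)
    simp only [pvKeepIdx, h0, List.filter_cons, ih']

theorem pvKeepIdx_eraseIdx {α : Type} (l : List α) (p : Nat → Bool) (j : Nat)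
    (hp : ∀ i ≤ j, p i = true) :
    (pvKeepIdx p l 0).eraseIdx j = pvKeepIdx (fun i => p i && !(i == j)) l 0 := by
  induction l generalizing p j with
  | nil => rfl
  | cons x xs ih =>
    have h0 : p 0 = true := hp 0 (Nat.zero_le _)
    cases j with
    | zero =>
      simp only [pvKeepIdx, h0, if_true, List.eraseIdx_cons_zero, beq_self_eq_true,
        Bool.not_true, Bool.and_false]
      rw [pvKeepIdx_shift, pvKeepIdx_shift]
      exact pvKeepIdx_congr _ _ _ _ (fun i _ => by simp)
    | succ j' =>
      simp only [pvKeepIdx, h0, if_true, List.eraseIdx_cons_succ]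
      have hc : (true && !((0:Nat) == j'+1)) = true := by simp
      rw [hc, if_pos rfl]
      rw [pvKeepIdx_shift, pvKeepIdx_shift,
        ih (fun i => p (i+1)) j' (fun i hi => hp (i+1) (by omega))]
      exact congrArg (x :: ·) (pvKeepIdx_congr _ _ _ _ (fun i _ => by simp))

theorem pvFoldrErase_eq_keepIdx {α : Type} (dn : List Nat) (l : List α)
    (h : dn.Pairwise (· < ·)) :
    dn.foldr (fun j acc => acc.eraseIdx j) l = pvKeepIdx (fun i => !(dn.contains i)) l 0 := by
  induction dn with
  | nil =>
    simp only [List.foldr_nil, List.contains_nil, Bool.not_false]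
    induction l with
    | nil => rfl
    | cons x xs ihl => simpa [pvKeepIdx, pvKeepIdx_shift] using ihl
  | cons j rest ih =>
    have hrest : ∀ m ∈ rest, j < m := fun m hm => (List.pairwise_cons.mp h).1 m hm
    rw [List.foldr_cons, ih (List.pairwise_cons.mp h).2,
      pvKeepIdx_eraseIdx l _ j (fun i hi => by
        simp only [Bool.not_eq_true', List.contains_eq_mem, decide_eq_false_iff_not]
        intro hmem; exact absurd (hrest i hmem) (by omega))]
    exact pvKeepIdx_congr _ _ _ _ (fun i _ => by
      by_cases hij : i = j <;> simp [hij, Bool.and_comm])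

theorem pvRevIdx_map (dn : List Nat) :
    (List.range dn.length).map (fun i => dn.getD (dn.length - 1 - i) 0) = dn.reverse := by
  apply List.ext_getElem
  · simp
  · intro k h1 h2
    simp only [List.length_map, List.length_range] at h1
    simp only [List.getElem_map, List.getElem_range, List.getElem_reverse]
    rw [List.getD_eq_getElem _ _ (by omega)]

theorem pvDelete_eq_keepIdx (l : List (List String)) (hd : List Nat) :
    pvDelete l hd = pvKeepIdx (fun i => !(hd.contains i)) l 0 := by
  have key : ∀ (dn : List Nat), dn.Pairwise (· < ·) → (∀ i, i ∈ dn ↔ i ∈ hd) →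
      (List.range dn.length).foldl (fun acc i => acc.eraseIdx (dn.getD (dn.length - 1 - i) 0)) l
        = pvKeepIdx (fun i => !(hd.contains i)) l 0 := by
    intro dn hpair hmem
    rw [← List.foldl_map (f := fun i => dn.getD (dn.length - 1 - i) 0)
          (g := fun (a : List (List String)) (j : Nat) => a.eraseIdx j),
        pvRevIdx_map, List.foldl_reverse,
        pvFoldrErase_eq_keepIdx _ _ hpair]
    exact pvKeepIdx_congr _ _ _ _ (fun i _ => by
      simp [List.contains_eq_mem, hmem i])
  exact key _ (PySem.List.sorted_ofList_pairwise_lt hd)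
    (fun i => by rw [PySem.List.mem_sorted, PySem.Set.mem_ofList])

theorem pvAllIn_eq (cl image : List String) : pvAllIn cl image = cl.all (fun c => image.contains c) := by
  induction cl with
  | nil => rfl
  | cons c rest ih => by_cases h : image.contains c = true <;> simp [pvAllIn, h, ih]

theorem pvAnyMissing_eq (cl image : List String) : pvAnyMissing cl image = cl.any (fun c => !(image.contains c)) := by
  induction cl with
  | nil => rfl
  | cons c rest ih => by_cases h : image.contains c = true <;> simp [pvAnyMissing, h, ih]

theorem pvMemMapFilter (P : List String → Bool) (tl : List (List String)) (i : Nat) :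
    i ∈ (tl.zipIdx.filter (fun p => P p.1)).map (·.2) ↔ ∃ (hk : i < tl.length), P tl[i] = true := by
  simp only [List.mem_map, List.mem_filter]
  constructor
  · rintro ⟨p, ⟨hpmem, hP⟩, hp2⟩
    rw [List.mem_zipIdx_iff_getElem?] at hpmem
    subst hp2
    obtain ⟨h1, h2⟩ := List.getElem?_eq_some_iff.mp hpmem
    exact ⟨h1, by rw [← h2] at hP; exact hP⟩
  · rintro ⟨hk, hP⟩
    exact ⟨(tl[i], i), ⟨List.mem_zipIdx_iff_getElem?.mpr (by simp), hP⟩, rfl⟩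

theorem mem_pvHd1 (rl tl : List (List String)) (i : Nat) :
    i ∈ pvHd1 rl tl ↔ ∃ (hk : i < tl.length), ∃ cl ∈ rl, pvAllIn cl tl[i] = true := by
  unfold pvHd1
  rw [show (fun (acc : List Nat) (clauses_list : List String) =>
        (tl.zipIdx).foldl (fun acc2 p => if pvAllIn clauses_list p.1 then acc2 ++ [p.2] else acc2) acc)
      = (fun acc clauses_list => acc ++ ((tl.zipIdx.filter (fun p => pvAllIn clauses_list p.1)).map (·.2)))
    from funext fun acc => funext fun cl => PySem.List.foldl_append_if _ _ _ _,
    PySem.List.foldl_append_eq_flatMap]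
  simp only [List.nil_append, List.mem_flatMap]
  constructor
  · rintro ⟨cl, hcl, hmem⟩
    obtain ⟨hk, hP⟩ := (pvMemMapFilter _ tl i).mp hmem
    exact ⟨hk, cl, hcl, hP⟩
  · rintro ⟨hk, cl, hcl, hP⟩
    exact ⟨cl, hcl, (pvMemMapFilter _ tl i).mpr ⟨hk, hP⟩⟩

theorem mem_pvHd2 (rl tl : List (List String)) (hrl : rl ≠ []) (i : Nat) :
    i ∈ pvHd2 rl tl ↔ ∃ (hk : i < tl.length),
      (∃ cl ∈ rl.dropLast, pvAllIn cl tl[i] = true) ∨ pvAnyMissing (rl.getLast hrl) tl[i] = true := by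
  unfold pvHd2
  rw [show (fun (acc : List Nat) (j : Nat) =>
      if j != rl.length - 1 then
        (tl.zipIdx).foldl (fun acc2 p => if pvAllIn (rl.getD j []) p.1 then acc2 ++ [p.2] else acc2) acc
      else
        (tl.zipIdx).foldl (fun acc2 p => if pvAnyMissing (rl.getD j []) p.1 then acc2 ++ [p.2] else acc2) acc)
    = (fun acc j => acc ++ (if j != rl.length - 1
        then ((tl.zipIdx.filter (fun p => pvAllIn (rl.getD j []) p.1)).map (·.2))
        else ((tl.zipIdx.filter (fun p => pvAnyMissing (rl.getD j []) p.1)).map (·.2))))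
    from funext fun acc => funext fun j => by
      rw [PySem.List.foldl_append_if _ _ _ _, PySem.List.foldl_append_if _ _ _ _, apply_ite (acc ++ ·)],
    PySem.List.foldl_append_eq_flatMap]
  simp only [List.nil_append, List.mem_flatMap, List.mem_range]
  have hlen : 0 < rl.length := List.length_pos_iff.mpr hrl
  have hlast : rl.getD (rl.length - 1) [] = rl.getLast hrl := by
    rw [List.getD_eq_getElem _ _ (by omega), List.getLast_eq_getElem]
  constructor
  · rintro ⟨j, hj, hmem⟩
    by_cases hje : j = rl.length - 1
    · subst hje
      simp only [bne_self_eq_false, if_false, Bool.false_eq_true] at hmem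
      rw [hlast, pvMemMapFilter] at hmem
      obtain ⟨hk, hP⟩ := hmem
      exact ⟨hk, Or.inr hP⟩
    · have : (j != rl.length - 1) = true := by simpa using hje
      rw [if_pos this, pvMemMapFilter] at hmem
      obtain ⟨hk, hP⟩ := hmem
      refine ⟨hk, Or.inl ⟨rl.getD j [], ?_, hP⟩⟩
      rw [List.getD_eq_getElem _ _ (by omega)]
      have hjlt : j < rl.length - 1 := by omega
      have := List.getElem_dropLast (xs := rl) (i := j) (by simpa [List.length_dropLast] using hjlt)
      rw [← this]
      exact List.getElem_mem _
  · rintro ⟨hk, hcase⟩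
    rcases hcase with ⟨cl, hcl, hP⟩ | hP
    · obtain ⟨j, hj, hcl'⟩ := List.mem_iff_getElem.mp hcl
      rw [List.length_dropLast] at hj
      refine ⟨j, by omega, ?_⟩
      have hne : (j != rl.length - 1) = true := by simp; omega
      rw [if_pos hne, pvMemMapFilter]
      refine ⟨hk, ?_⟩
      rw [List.getD_eq_getElem _ _ (by omega), ← List.getElem_dropLast (xs := rl) (i := j) (by simpa [List.length_dropLast] using hj), hcl']
      exact hP
    · refine ⟨rl.length - 1, by omega, ?_⟩
      rw [if_neg (by simp), pvMemMapFilter, hlast]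
      exact ⟨hk, hP⟩

theorem pvInnerTail (C : String → List String → Bool) (xs : List String) :
    ∀ (k : Nat) (out : List String),
    (xs.zipIdx (k+1)).foldl (fun ct2 p => if (p.2 != 0) && C p.1 ct2 then ct2 ++ [p.1] else ct2) out
      = xs.foldl (fun ct2 c => if C c ct2 then ct2 ++ [c] else ct2) out := by
  induction xs with
  | nil => intro k out; rfl
  | cons x rest ih =>
    intro k out
    simp only [List.zipIdx_cons, List.foldl_cons]
    have : ((k+1 : Nat) != 0) = true := by simp
    rw [show (((x, k+1).2 != 0) && C (x, k+1).1 out) = C x out by simp [this]]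
    exact ih (k+1) _

theorem pvInner_eq (C : String → List String → Bool) (image : List String) (out : List String) :
    (image.zipIdx).foldl (fun ct2 p => if (p.2 != 0) && C p.1 ct2 then ct2 ++ [p.1] else ct2) out
      = image.tail.foldl (fun ct2 c => if C c ct2 then ct2 ++ [c] else ct2) out := by
  cases image with
  | nil => rfl
  | cons x rest =>
    simp only [List.zipIdx_cons, List.foldl_cons, List.tail_cons]
    rw [show (((x, 0).2 != 0) && C (x, 0).1 out) = false by simp]
    simp only [Bool.false_eq_true, if_false]
    exact pvInnerTail C rest 0 out

-- ===== VERDICT (by name: the statement is the Claim_ definition above) =====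
theorem get_possible_clause1_spec : Claim_equal_get_possible_clause1 := by
  intro counting tl rl _ hpre
  unfold Spec_get_possible_clause1
  by_cases hc : counting = 0
  · unfold get_possible_clause1 get_possible_clause1_alt
    rw [if_pos hc, if_pos hc]
    unfold pvGNTL1 pvCollect
    rw [pvDelete_eq_keepIdx,
      pvKeepIdx_eq_filter _ (pvKeep0 rl) tl 0 (fun k hk => by
        rw [Bool.eq_iff_iff]
        simp only [Nat.zero_add, Bool.not_eq_true', List.contains_eq_mem,
          decide_eq_false_iff_not, mem_pvHd1, pvKeep0, Bool.not_eq_true, Bool.not_eq_true',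
          List.any_eq_false, pvAllIn_eq]
        constructor
        · intro h cl hcl
          by_contra hall
          exact h ⟨hk, cl, hcl, by simpa using hall⟩
        · rintro h ⟨_, cl, hcl, hall⟩
          exact absurd (h cl hcl) (by simpa using hall)),
      show (fun (out : List String) (image : List String) =>
          if pvKeep0 rl image then
            (PySem.List.slice image (some 1) none).foldl (fun out2 c =>
              if !([] : List String).contains c && !out2.contains c then out2 ++ [c] else out2) out
          else out)
        = (fun out image =>
          if pvKeep0 rl image then
            image.tail.foldl (fun out2 c => if !out2.contains c then out2 ++ [c] else out2) out
          else out)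
      from funext fun out => funext fun image => by
        rw [PySem.List.slice_from_one]
        simp,
      PySem.List.foldl_if_eq_foldl_filter]
    exact PySem.List.foldl_congr_mem (init := []) (h :=
      fun acc image _ => pvInner_eq (fun c ct => !ct.contains c) image acc)
  · have hrl : rl ≠ [] := hpre.resolve_left hc
    have hlast? : PySem.List.pyGet? rl (-1) = some (rl.getLast hrl) := by
      rw [PySem.List.pyGet?_neg_one, List.getLast?_eq_some_getLast]
    have hlastD : PySem.List.pyGetD rl ((rl.length : Int) - 1) [] = rl.getLast hrl := by
      have hlen : 0 < rl.length := List.length_pos_iff.mpr hrl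
      have : ((rl.length : Int) - 1) = ((rl.length - 1 : Nat) : Int) := by push_cast [hlen]; omega
      rw [this, PySem.List.pyGetD_natCast, List.getD_eq_getElem _ _ (by omega),
        List.getLast_eq_getElem]
    have hred : get_possible_clause1_alt counting tl rl
        = pvCollect (pvKeep1 (PySem.List.slice rl none (some (-1))) (rl.getLast hrl)) (rl.getLast hrl) tl := by
      unfold get_possible_clause1_alt
      rw [if_neg hc, hlast?]
    rw [hred]
    unfold get_possible_clause1
    rw [if_neg hc]
    unfold pvGNTL pvCollect
    rw [PySem.List.slice_to_neg_one, hlastD,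
      pvDelete_eq_keepIdx,
      pvKeepIdx_eq_filter _ (pvKeep1 rl.dropLast (rl.getLast hrl)) tl 0 (fun k hk => by
        rw [Bool.eq_iff_iff]
        simp only [Nat.zero_add, Bool.not_eq_true', List.contains_eq_mem,
          decide_eq_false_iff_not, mem_pvHd2 rl tl hrl, pvKeep1, Bool.not_eq_true,
          Bool.or_eq_false_iff, List.any_eq_false, pvAllIn_eq, pvAnyMissing_eq]
        constructor
        · intro h
          constructor
          · intro cl hcl
            by_contra hall
            exact h ⟨hk, Or.inl ⟨cl, hcl, by simpa [pvAllIn_eq] using hall⟩⟩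
          · by_contra hany
            exact h ⟨hk, Or.inr (by simpa [pvAnyMissing_eq] using hany)⟩
        · rintro ⟨h1, h2⟩ ⟨_, hcase⟩
          rcases hcase with ⟨cl, hcl, hall⟩ | hany
          · exact absurd (h1 cl hcl) (by simpa [pvAllIn_eq] using hall)
          · exact absurd h2 (by simpa [pvAnyMissing_eq] using hany)),
      show (fun (out : List String) (image : List String) =>
          if pvKeep1 rl.dropLast (rl.getLast hrl) image then
            (PySem.List.slice image (some 1) none).foldl (fun out2 c =>
              if !(rl.getLast hrl).contains c && !out2.contains c then out2 ++ [c] else out2) out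
          else out)
        = (fun out image =>
          if pvKeep1 rl.dropLast (rl.getLast hrl) image then
            image.tail.foldl (fun out2 c =>
              if !(rl.getLast hrl).contains c && !out2.contains c then out2 ++ [c] else out2) out
          else out)
      from funext fun out => funext fun image => by rw [PySem.List.slice_from_one],
      PySem.List.foldl_if_eq_foldl_filter]
    exact PySem.List.foldl_congr_mem (init := []) (h :=
      fun acc image _ => pvInner_eq
        (fun c ct => !(rl.getLast hrl).contains c && !ct.contains c) image acc)
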